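-- pv_equiv track=rewrite | github.com/tmfrlrkvlek/algorithm_python | Programmers/Python/64063.py | solution
-- ===== SOURCE A (Python) =====
-- def solution(k, room_number):
--     def find(num, empty_room) :
--         if num not in empty_room :
--             empty_room[num] = num+1
--             return num
--         number = find(empty_room[num], empty_room)
--         empty_room[num] = number
--         return number
--     answer = []
--     empty_room = {}
--     for num in room_number :
--         number = find(num, empty_room)
--         answer.append(number)
--     return answer
-- ===== SOURCE B (Python) =====
-- def solution(k, room_number):
--     # Plain occupied-set with linear upward probing: the assigned room for num
--     # is simply the smallest integer >= num not yet taken. No dict, no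
--     # union-find, no path compression.
--     occupied = set()
--     answer = []
--     for num in room_number:
--         cur = num
--         while cur in occupied:
--             cur += 1
--         occupied.add(cur)
--         answer.append(cur)
--     return answer
-- ===== Notes on version B (the rewrite author's own statement) =====
-- stated objective: alternative
-- what changed: Replaces A's recursive union-find with path compression (a dict of next-room links) by a plain set of occupied rooms and a linear upward probe: the answer for each num is the smallest integer >= num not yet occupied, which is exactly what A's find returns.
import Mathlib
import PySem

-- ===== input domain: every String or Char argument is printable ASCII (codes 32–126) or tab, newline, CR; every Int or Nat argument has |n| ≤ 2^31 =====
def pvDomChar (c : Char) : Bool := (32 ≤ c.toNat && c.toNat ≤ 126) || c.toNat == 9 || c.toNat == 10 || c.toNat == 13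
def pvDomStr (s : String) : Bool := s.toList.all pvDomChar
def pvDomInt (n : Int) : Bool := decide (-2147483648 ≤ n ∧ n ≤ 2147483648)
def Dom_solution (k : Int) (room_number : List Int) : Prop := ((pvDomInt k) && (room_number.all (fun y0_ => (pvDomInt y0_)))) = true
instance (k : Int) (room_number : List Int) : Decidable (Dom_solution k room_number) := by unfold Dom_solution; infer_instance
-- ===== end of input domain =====

-- ===== PORT A =====
-- B replaces A's union-find-with-path-compression dict by an occupied set with
-- linear upward probing; the proof shows both assign the smallest free room ≥ num.
-- fuel = dict size + 1 only makes the recursion total; it is never exhausted on the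
-- dicts solution builds (every value stored is strictly greater than its key).
def findA : Nat → Int → PySem.Dict Int Int → Int × PySem.Dict Int Int
  | 0, num, d => (num, d.insert num (num + 1))
  | fuel + 1, num, d =>
    match d.get? num with
    | none => (num, d.insert num (num + 1))
    | some v =>
      let r := findA fuel v d
      (r.1, r.2.insert num r.1)

def solution (k : Int) (room_number : List Int) : List Int :=
  (room_number.foldl
    (fun (st : List Int × PySem.Dict Int Int) num =>
      let r := findA (st.2.size + 1) num st.2
      (st.1 ++ [r.1], r.2))
    ([], PySem.Dict.empty)).1

-- ===== PORT B =====
-- 'while cur in occupied: cur += 1'; fuel = set size + 1 is never exhausted,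
-- since a run of consecutive occupied integers has at most `size` members.
def probeB : Nat → Int → PySem.Set Int → Int
  | 0, cur, _ => cur
  | fuel + 1, cur, occ =>
    if PySem.Set.contains occ cur then probeB fuel (cur + 1) occ else cur

def solution_alt (k : Int) (room_number : List Int) : List Int :=
  (room_number.foldl
    (fun (st : List Int × PySem.Set Int) num =>
      let cur := probeB (st.2.length + 1) num st.2
      (st.1 ++ [cur], PySem.Set.add st.2 cur))
    ([], PySem.Set.empty)).1

-- ===== PRECONDITION & SPEC =====
def Spec_solution (k : Int) (room_number : List Int) (out : List Int) : Prop := out = solution_alt k room_number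
instance (k : Int) (room_number : List Int) (out : List Int) : Decidable (Spec_solution k room_number out) := by unfold Spec_solution; infer_instance

-- ===== CLAIM (what is proved, stated in full; the proofs are below) =====
def Claim_equal_solution : Prop := ∀ (k : Int) (room_number : List Int), Dom_solution k room_number → Spec_solution k room_number (solution k room_number)

-- ===== LEMMAS AND PROOFS =====

-- Invariant on A's dict: each stored link x ↦ v has x < v and all of [x, v) occupied.
def InvA (d : PySem.Dict Int Int) : Prop :=
  ∀ x v, d.get? x = some v → x < v ∧ ∀ y, x ≤ y → y < v → y ∈ d.keys

-- e is the first free room at or above num, w.r.t. the occupied list L.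
def FF (L : List Int) (num e : Int) : Prop :=
  num ≤ e ∧ e ∉ L ∧ ∀ y, num ≤ y → y < e → y ∈ L

theorem ff_exists (L : List Int) (num : Int) :
    ∃ e, FF L num e ∧ (e - num).toNat ≤ L.length := by
  classical
  have hexb : ∃ n : Nat, n ≤ L.length ∧ num + (n : Int) ∉ L := by
    by_contra hall
    push_neg at hall
    have hsub : ((List.range (L.length + 1)).map (fun n : Nat => (num + (n : Int)))) ⊆ L := by
      intro y hy
      simp only [List.mem_map, List.mem_range] at hy
      obtain ⟨n, hn, rfl⟩ := hy
      exact hall n (by omega)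
    have hnd : ((List.range (L.length + 1)).map (fun n : Nat => (num + (n : Int)))).Nodup := by
      refine (List.nodup_range).map ?_
      intro a b h
      simp only [add_right_inj, Nat.cast_inj] at h
      exact h
    have := (List.subperm_of_subset hnd hsub).length_le
    simp at this
  have hex : ∃ n : Nat, num + (n : Int) ∉ L := ⟨hexb.choose, hexb.choose_spec.2⟩
  refine ⟨num + Nat.find hex, ⟨by omega, Nat.find_spec hex, ?_⟩, ?_⟩
  · intro y hy1 hy2
    have hm : (y - num).toNat < Nat.find hex := by omega
    have hmin := Nat.find_min hex hm
    have hy : num + (((y - num).toNat : Nat) : Int) = y := by omega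
    rw [hy] at hmin
    exact not_not.mp hmin
  · have h1 : Nat.find hex ≤ hexb.choose := Nat.find_min' hex hexb.choose_spec.2
    have h2 := hexb.choose_spec.1
    omega

theorem probeB_correct : ∀ (fuel : Nat) (num : Int) (occ : PySem.Set Int) (e : Int),
    FF occ num e → (e - num).toNat < fuel → probeB fuel num occ = e := by
  intro fuel
  induction fuel with
  | zero => intro num occ e _ h; omega
  | succ n ih =>
    intro num occ e hff hfuel
    obtain ⟨h1, h2, h3⟩ := hff
    simp only [probeB]
    by_cases hmem : num ∈ occ
    · have hne : num ≠ e := fun h => h2 (h ▸ hmem)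
      have hlt : num < e := lt_of_le_of_ne h1 hne
      rw [if_pos (by simpa [PySem.Set.contains_iff] using hmem)]
      exact ih (num + 1) occ e ⟨by omega, h2, fun y hy1 hy2 => h3 y (by omega) hy2⟩ (by omega)
    · have he : e = num := by
        by_contra hne
        exact hmem (h3 num le_rfl (lt_of_le_of_ne h1 (Ne.symm hne)))
      rw [if_neg (by simpa [PySem.Set.contains_iff] using hmem)]
      omega

theorem findA_correct (d : PySem.Dict Int Int) (hnd : d.keys.Nodup) (hinv : InvA d) :
    ∀ (fuel : Nat) (num e : Int),
    FF d.keys num e → (e - num).toNat < fuel →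
    (findA fuel num d).1 = e ∧ (findA fuel num d).2.keys = d.keys ++ [e] ∧
      (findA fuel num d).2.keys.Nodup ∧ InvA (findA fuel num d).2 := by
  intro fuel
  induction fuel with
  | zero => intro num e _ h; omega
  | succ n ih =>
    intro num e hff hfuel
    cases h : d.get? num with
    | none =>
      have hnm : num ∉ d.keys := (PySem.Dict.get?_eq_none_iff_not_mem_keys d num).mp h
      have he : e = num := by
        by_contra hne
        exact hnm (hff.2.2 num le_rfl (lt_of_le_of_ne hff.1 (Ne.symm hne)))
      have hc : d.contains num = false := by
        cases hcc : d.contains num with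
        | false => rfl
        | true => exact absurd ((PySem.Dict.contains_iff_mem_keys d num).mp hcc) hnm
      have hkeys : (d.insert num (num + 1)).keys = d.keys ++ [num] :=
        PySem.Dict.keys_insert_of_not_contains d (num + 1) hc
      refine ⟨?_, ?_, ?_, ?_⟩ <;> simp only [findA, h]
      · omega
      · rw [hkeys, he]
      · rw [hkeys]
        simp [List.nodup_append, hnd]
        intro a ha hh
        exact hnm (hh ▸ ha)
      · intro x v hx
        rw [hkeys]
        by_cases hxn : x = num
        · subst hxn
          rw [PySem.Dict.get?_insert_self] at hx
          obtain rfl : v = x + 1 := by injection hx with h'; omega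
          exact ⟨by omega, fun y hy1 hy2 => by
            have : y = x := by omega
            subst this; simp⟩
        · rw [PySem.Dict.get?_insert_of_ne _ _ hxn] at hx
          obtain ⟨h1, h2⟩ := hinv x v hx
          exact ⟨h1, fun y hy1 hy2 => List.mem_append_left _ (h2 y hy1 hy2)⟩
    | some v =>
      obtain ⟨hlt, hintv⟩ := hinv num v h
      have hnumk : num ∈ d.keys := hintv num le_rfl (by omega)
      have hnum_lt_e : num < e := by
        rcases lt_or_eq_of_le hff.1 with h' | h'
        · exact h'
        · exact absurd (h' ▸ hnumk) hff.2.1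
      have hve : v ≤ e := by
        by_contra hgt
        exact hff.2.1 (hintv e (by omega) (by omega))
      have hff' : FF d.keys v e :=
        ⟨hve, hff.2.1, fun y hy1 hy2 => hff.2.2 y (by omega) hy2⟩
      obtain ⟨ih1, ih2, ih3, ih4⟩ := ih v e hff' (by omega)
      have hmem2 : num ∈ (findA n v d).2.keys := ih2 ▸ List.mem_append_left _ hnumk
      have hc2 : (findA n v d).2.contains num = true :=
        (PySem.Dict.contains_iff_mem_keys (findA n v d).2 num).mpr hmem2
      have hkeys2 : ((findA n v d).2.insert num (findA n v d).1).keys = (findA n v d).2.keys :=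
        PySem.Dict.keys_insert_of_contains (findA n v d).2 (findA n v d).1 hc2
      refine ⟨?_, ?_, ?_, ?_⟩ <;> simp only [findA, h]
      · exact ih1
      · rw [hkeys2, ih2]
      · rw [hkeys2]; exact ih3
      · intro x w hx
        rw [hkeys2]
        by_cases hxn : x = num
        · subst hxn
          rw [PySem.Dict.get?_insert_self] at hx
          obtain rfl : w = (findA n v d).1 := by injection hx with h'; omega
          rw [ih1, ih2]
          exact ⟨hnum_lt_e, fun y hy1 hy2 =>
            List.mem_append_left _ (hff.2.2 y hy1 hy2)⟩
        · rw [PySem.Dict.get?_insert_of_ne _ _ hxn] at hx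
          exact ih4 x w hx

theorem loop_inv : ∀ (l : List Int) (acc : List Int) (d : PySem.Dict Int Int) (occ : PySem.Set Int),
    d.keys = occ → d.keys.Nodup → InvA d →
    (l.foldl (fun (st : List Int × PySem.Dict Int Int) num =>
        let r := findA (st.2.size + 1) num st.2
        (st.1 ++ [r.1], r.2)) (acc, d)).1
    = (l.foldl (fun (st : List Int × PySem.Set Int) num =>
        let cur := probeB (st.2.length + 1) num st.2
        (st.1 ++ [cur], PySem.Set.add st.2 cur)) (acc, occ)).1 := by
  intro l
  induction l with
  | nil => intro acc d occ _ _ _; rfl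
  | cons num l ih =>
    intro acc d occ hkeys hnd hinv
    obtain ⟨e, hff, hbound⟩ := ff_exists d.keys num
    have hsz : d.size = d.keys.length := by
      simp [PySem.Dict.keys, PySem.Dict.size]
    have hfa := findA_correct d hnd hinv (d.size + 1) num e hff (by omega)
    have hpb : probeB (occ.length + 1) num occ = e :=
      probeB_correct (occ.length + 1) num occ e (hkeys ▸ hff)
        (by rw [← hkeys]; omega)
    have hne : e ∉ occ := hkeys ▸ hff.2.1
    have hadd : PySem.Set.add occ e = occ ++ [e] := PySem.Set.add_of_not_mem hne
    rw [List.foldl_cons, List.foldl_cons]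
    simp only [hfa.1, hpb, hadd]
    exact ih (acc ++ [e]) _ (occ ++ [e])
      (by rw [hfa.2.1, hkeys]) hfa.2.2.1 hfa.2.2.2

-- ===== VERDICT (by name: the statement is the Claim_ definition above) =====
theorem solution_spec : Claim_equal_solution := by
  intro k room_number _
  unfold Spec_solution solution solution_alt
  exact loop_inv room_number [] PySem.Dict.empty PySem.Set.empty rfl (by simp) (by intro x v h; simp [PySem.Dict.get?_empty] at h)
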